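-- pv_equiv track=rewrite | github.com/gtmachado/case-automacao-liber-geilson-machado | main.py | extrair_dados_candidato
-- ===== SOURCE A (Python) =====
-- def extrair_dados_candidato(corpo_email: str) -> dict:
--     """
--     Extrai os dados do candidato (Nome, Vaga, Telefone) do corpo.
--     """
--     dados = {"Nome": None, "Vaga": None, "Telefone": None}
--
--     linhas = corpo_email.split('\n')
--
--     # Meu raciocínio aqui foi ler linha por linha em vez de
--     # esperar uma ordem fixa. Acredito que isso deixe a extração robusta
--     # para os casos de "campos fora de ordem" e variações
--     # como 'celular' ou 'nome completo'.
--     for linha in linhas: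
--         linha_limpa = linha.lower().strip()
--
--         if (linha_limpa.startswith("nome:") or
--             linha_limpa.startswith("nome completo:")):
--             dados["Nome"] = linha.split(':', 1)[1].strip()
--
--         elif linha_limpa.startswith("vaga:"):
--             dados["Vaga"] = linha.split(':', 1)[1].strip()
--
--         elif (linha_limpa.startswith("telefone:") or
--               linha_limpa.startswith("celular:") or
--               linha_limpa.startswith("whatsapp:")):
--             dados["Telefone"] = linha.split(':', 1)[1].strip()
--
--     return dados
-- ===== SOURCE B (Python) =====
-- def extrair_dados_candidato(corpo_email: str) -> dict:
--     """Field-outer / line-inner: for each field, rescan all lines and keep the last matching one."""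
--     linhas = corpo_email.split('\n')
--     campos = [
--         ("Nome", ("nome:", "nome completo:")),
--         ("Vaga", ("vaga:",)),
--         ("Telefone", ("telefone:", "celular:", "whatsapp:")),
--     ]
--     dados = {}
--     for campo, prefixos in campos:
--         valor = None
--         for linha in linhas:
--             if any(linha.lower().strip().startswith(p) for p in prefixos):
--                 valor = linha.split(':', 1)[1].strip()
--         dados[campo] = valor
--     return dados
-- ===== Notes on version B (the rewrite author's own statement) =====
-- stated objective: alternative
-- what changed: B inverts the traversal: instead of A's single line-outer loop dispatching each line through an elif chain, B iterates field-outer/line-inner, rescanning all lines once per field and keeping the value of the last line matching that field's prefixes.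
import Mathlib
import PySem

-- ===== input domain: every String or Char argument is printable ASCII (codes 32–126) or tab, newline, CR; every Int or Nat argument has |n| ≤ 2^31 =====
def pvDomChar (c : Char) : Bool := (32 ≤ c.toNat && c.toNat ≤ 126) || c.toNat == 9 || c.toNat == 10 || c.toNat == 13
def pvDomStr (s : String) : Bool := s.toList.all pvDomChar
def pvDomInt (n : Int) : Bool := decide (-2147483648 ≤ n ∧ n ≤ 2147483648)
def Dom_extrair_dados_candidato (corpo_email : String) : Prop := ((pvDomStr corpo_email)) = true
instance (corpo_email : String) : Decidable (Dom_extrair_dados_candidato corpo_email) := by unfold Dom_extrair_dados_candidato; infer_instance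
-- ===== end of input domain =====

-- B rescans the lines once per field (field-outer/line-inner, last match wins) instead of A's
-- single line-outer elif dispatch; objective: alternative decomposition, same result.

-- ===== PORT A =====
-- linha.split(':', 1)[1].strip() — used by both Pythons on lines guaranteed to contain ':'
-- (their prefix tests only fire on lines whose prefix ends in ':'); the none branches are unreachable there.
def pvValor (linha : String) : String :=
  match PySem.Str.splitMax? linha ":" 1 with
  | some parts =>
    match PySem.List.pyGet? parts 1 with
    | some v => PySem.Str.strip v
    | none => ""      -- IndexError in Python; unreachable at every call site
  | none => ""        -- sep = "" never happens (sep is ":")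

-- one step of A's for-loop; the fixed-key dict {"Nome","Vaga","Telefone"} is the triple (in insertion order)
def pvStepA (d : Option String × Option String × Option String) (linha : String) :
    Option String × Option String × Option String :=
  let ll := PySem.Str.strip (PySem.Str.lower linha)
  if PySem.Str.startswith ll "nome:" || PySem.Str.startswith ll "nome completo:" then
    (some (pvValor linha), d.2.1, d.2.2)
  else if PySem.Str.startswith ll "vaga:" then
    (d.1, some (pvValor linha), d.2.2)
  else if PySem.Str.startswith ll "telefone:" || PySem.Str.startswith ll "celular:" ||
          PySem.Str.startswith ll "whatsapp:" then
    (d.1, d.2.1, some (pvValor linha))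
  else d

def extrair_dados_candidato (corpo_email : String) : List (String × Option String) :=
  let linhas := (PySem.Str.split? corpo_email "\n").getD []   -- sep "\n" ≠ "": always some
  let dados := linhas.foldl pvStepA (none, none, none)
  [("Nome", dados.1), ("Vaga", dados.2.1), ("Telefone", dados.2.2)]

-- ===== PORT B =====
-- inner scan of B: last line matching one of the field's prefixes, else the accumulator
def pvStepCampo (prefixos : List String) (valor : Option String) (linha : String) : Option String :=
  if prefixos.any (fun p => PySem.Str.startswith (PySem.Str.strip (PySem.Str.lower linha)) p) then
    some (pvValor linha)
  else valor

def pvCampos : List (String × List String) :=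
  [("Nome", ["nome:", "nome completo:"]),
   ("Vaga", ["vaga:"]),
   ("Telefone", ["telefone:", "celular:", "whatsapp:"])]

def extrair_dados_candidato_alt (corpo_email : String) : List (String × Option String) :=
  let linhas := (PySem.Str.split? corpo_email "\n").getD []   -- sep "\n" ≠ "": always some
  pvCampos.map (fun campo => (campo.1, linhas.foldl (pvStepCampo campo.2) none))

-- ===== PRECONDITION & SPEC =====
def Spec_extrair_dados_candidato (corpo_email : String) (out : List (String × Option String)) : Prop := out = extrair_dados_candidato_alt corpo_email
instance (corpo_email : String) (out : List (String × Option String)) : Decidable (Spec_extrair_dados_candidato corpo_email out) := by unfold Spec_extrair_dados_candidato; infer_instance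

-- ===== CLAIM (what is proved, stated in full; the proofs are below) =====
def Claim_equal_extrair_dados_candidato : Prop := ∀ (corpo_email : String), Dom_extrair_dados_candidato corpo_email → Spec_extrair_dados_candidato corpo_email (extrair_dados_candidato corpo_email)

-- ===== LEMMAS AND PROOFS =====

-- if s starts with prefix c::p', then s starts with c
theorem pv_sw_head {s p : List Char} {c : Char} {p' : List Char}
    (hp : p = c :: p') (h : PySem.Chars.startswith s p = true) : s.head? = some c := by
  subst hp
  rcases (PySem.Chars.startswith_iff s (c :: p')).mp h with ⟨t, ht⟩
  subst ht; rfl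

theorem pv_headN {s : String}
    (h : (PySem.Str.startswith s "nome:" || PySem.Str.startswith s "nome completo:") = true) :
    s.toList.head? = some 'n' := by
  simp only [PySem.Str.startswith_eq, Bool.or_eq_true] at h
  rcases h with h | h
  · exact pv_sw_head (p' := "ome:".toList) rfl h
  · exact pv_sw_head (p' := "ome completo:".toList) rfl h

theorem pv_headV {s : String} (h : PySem.Str.startswith s "vaga:" = true) :
    s.toList.head? = some 'v' := by
  simp only [PySem.Str.startswith_eq] at h
  exact pv_sw_head (p' := "aga:".toList) rfl h

theorem pv_headT {s : String}
    (h : (PySem.Str.startswith s "telefone:" || PySem.Str.startswith s "celular:" ||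
          PySem.Str.startswith s "whatsapp:") = true) :
    s.toList.head? = some 't' ∨ s.toList.head? = some 'c' ∨ s.toList.head? = some 'w' := by
  simp only [PySem.Str.startswith_eq, Bool.or_eq_true] at h
  rcases h with (h | h) | h
  · exact Or.inl (pv_sw_head (p' := "elefone:".toList) rfl h)
  · exact Or.inr (Or.inl (pv_sw_head (p' := "elular:".toList) rfl h))
  · exact Or.inr (Or.inr (pv_sw_head (p' := "hatsapp:".toList) rfl h))

-- one line updates the three components independently: the three field conditions are
-- mutually exclusive because the prefixes have pairwise distinct first letters
theorem pv_step (d : Option String × Option String × Option String) (linha : String) :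
    pvStepA d linha =
      (pvStepCampo ["nome:", "nome completo:"] d.1 linha,
       pvStepCampo ["vaga:"] d.2.1 linha,
       pvStepCampo ["telefone:", "celular:", "whatsapp:"] d.2.2 linha) := by
  unfold pvStepA pvStepCampo
  simp only [List.any_cons, List.any_nil, Bool.or_false, ← Bool.or_assoc]
  set s := PySem.Str.strip (PySem.Str.lower linha) with hs
  by_cases hN : (PySem.Str.startswith s "nome:" || PySem.Str.startswith s "nome completo:") = true
  · have hn := pv_headN hN
    have hV : PySem.Str.startswith s "vaga:" = false := by
      cases hv : PySem.Str.startswith s "vaga:" with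
      | false => rfl
      | true => rw [pv_headV hv] at hn; exact absurd hn (by decide)
    have hT : (PySem.Str.startswith s "telefone:" || PySem.Str.startswith s "celular:" ||
               PySem.Str.startswith s "whatsapp:") = false := by
      cases ht : (PySem.Str.startswith s "telefone:" || PySem.Str.startswith s "celular:" ||
                  PySem.Str.startswith s "whatsapp:") with
      | false => rfl
      | true =>
        rcases pv_headT ht with h | h | h <;> (rw [h] at hn; exact absurd hn (by decide))
    simp only [hN, hV, hT]; simp
  · rw [Bool.not_eq_true] at hN
    by_cases hV : PySem.Str.startswith s "vaga:" = true
    · have hv := pv_headV hV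
      have hT : (PySem.Str.startswith s "telefone:" || PySem.Str.startswith s "celular:" ||
                 PySem.Str.startswith s "whatsapp:") = false := by
        cases ht : (PySem.Str.startswith s "telefone:" || PySem.Str.startswith s "celular:" ||
                    PySem.Str.startswith s "whatsapp:") with
        | false => rfl
        | true =>
          rcases pv_headT ht with h | h | h <;> (rw [h] at hv; exact absurd hv (by decide))
      simp only [hN, hV, hT]; simp
    · rw [Bool.not_eq_true] at hV
      by_cases hT : (PySem.Str.startswith s "telefone:" || PySem.Str.startswith s "celular:" ||
                     PySem.Str.startswith s "whatsapp:") = true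
      · simp only [hN, hV, hT]; simp
      · rw [Bool.not_eq_true] at hT
        simp only [hN, hV, hT]; simp

-- folding A's step = folding the three field scans independently
theorem pv_fold (ls : List String) (d : Option String × Option String × Option String) :
    ls.foldl pvStepA d =
      (ls.foldl (pvStepCampo ["nome:", "nome completo:"]) d.1,
       ls.foldl (pvStepCampo ["vaga:"]) d.2.1,
       ls.foldl (pvStepCampo ["telefone:", "celular:", "whatsapp:"]) d.2.2) := by
  induction ls generalizing d with
  | nil => rfl
  | cons l ls ih => simp only [List.foldl_cons, pv_step, ih]

-- ===== VERDICT (by name: the statement is the Claim_ definition above) =====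
theorem extrair_dados_candidato_spec : Claim_equal_extrair_dados_candidato := by
  intro corpo _
  unfold Spec_extrair_dados_candidato extrair_dados_candidato extrair_dados_candidato_alt pvCampos
  simp only [List.map_cons, List.map_nil, pv_fold]
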